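-- pv_equiv track=rewrite | github.com/Clay-Hamilton/GameTheoryTester | maxmin:minmax.py | maxmin_first
-- ===== SOURCE A (Python) =====
-- def maxmin_first(u1):
--     minlist = []
--     for row in range(len(u1)):
--         minlist.append(min(u1[row]))
--     finlist = []
--     maxnum = max(minlist)
--     for i in range(len(minlist)):
--         if minlist[i] == maxnum:
--             finlist.append(i)
--     return finlist
-- ===== SOURCE B (Python) =====
-- def maxmin_first(u1):
--     best = None
--     idxs = []
--     for i, row in enumerate(u1):
--         m = min(row)
--         if best is None or m > best:
--             best = m
--             idxs = [i]
--         elif m == best: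
--             idxs.append(i)
--     return idxs
-- ===== Notes on version B (the rewrite author's own statement) =====
-- stated objective: alternative
-- what changed: Single forward pass with enumerate maintaining a running best row-min and the index list achieving it, instead of building a full min-list, taking its max, and rescanning it by index.
import Mathlib
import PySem

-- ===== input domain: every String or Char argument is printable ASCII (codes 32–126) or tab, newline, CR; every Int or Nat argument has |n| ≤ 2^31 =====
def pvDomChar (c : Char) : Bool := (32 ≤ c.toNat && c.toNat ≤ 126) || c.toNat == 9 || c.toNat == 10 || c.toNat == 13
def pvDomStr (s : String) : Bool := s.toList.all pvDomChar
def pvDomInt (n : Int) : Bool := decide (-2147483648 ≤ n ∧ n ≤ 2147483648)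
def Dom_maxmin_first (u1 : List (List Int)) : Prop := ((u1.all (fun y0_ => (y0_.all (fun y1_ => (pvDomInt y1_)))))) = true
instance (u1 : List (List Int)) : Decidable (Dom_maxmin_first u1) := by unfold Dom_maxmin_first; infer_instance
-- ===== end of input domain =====

-- B replaces A's three passes (build the min-list, max it, rescan it by index) by one forward pass
-- keeping a running best row-min and the index list achieving it (objective: alternative one-pass decomposition).

-- ===== PORT A =====
def maxmin_first (u1 : List (List Int)) : List Int :=
  -- minlist = []; for row in range(len(u1)): minlist.append(min(u1[row]))
  let minlist : List Int :=
    (PySem.List.pyRange 0 (PySem.List.len u1) 1).foldl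
      (fun acc row => acc ++ [(PySem.List.min? (PySem.List.pyGetD u1 row []) (fun x => x)).getD 0]) []
  -- maxnum = max(minlist)
  let maxnum : Int := (PySem.List.max? minlist (fun x => x)).getD 0
  -- finlist = []; for i in range(len(minlist)): if minlist[i] == maxnum: finlist.append(i)
  (PySem.List.pyRange 0 (PySem.List.len minlist) 1).foldl
    (fun acc i => if PySem.List.pyGetD minlist i 0 = maxnum then acc ++ [i] else acc) []

-- ===== PORT B =====
-- one pass: i = next index, best = running max row-min (None before the first row), idxs = its indices
def maxminAltLoop (rows : List (List Int)) (i : Int) (best : Option Int) (idxs : List Int) : List Int :=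
  match rows with
  | [] => idxs
  | r :: rest =>
    let m : Int := (PySem.List.min? r (fun x => x)).getD 0
    match best with
    | none => maxminAltLoop rest (i + 1) (some m) [i]
    | some b =>
      if m > b then maxminAltLoop rest (i + 1) (some m) [i]
      else if m = b then maxminAltLoop rest (i + 1) (some b) (idxs ++ [i])
      else maxminAltLoop rest (i + 1) (some b) idxs

def maxmin_first_alt (u1 : List (List Int)) : List Int :=
  maxminAltLoop u1 0 none []

-- ===== PRECONDITION & SPEC =====
-- A raises ValueError on the empty matrix (max of []) and on any empty row (min of []); Pre_ excludes exactly those.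
def Pre_maxmin_first (u1 : List (List Int)) : Prop := u1 ≠ [] ∧ ∀ r ∈ u1, r ≠ []
instance (u1 : List (List Int)) : Decidable (Pre_maxmin_first u1) := by unfold Pre_maxmin_first; infer_instance
def pvWitness_maxmin_first : List (List Int) := [[1, 2], [3], [0, 5]]

def Spec_maxmin_first (u1 : List (List Int)) (out : List Int) : Prop := out = maxmin_first_alt u1
instance (u1 : List (List Int)) (out : List Int) : Decidable (Spec_maxmin_first u1 out) := by unfold Spec_maxmin_first; infer_instance

-- ===== CLAIM (what is proved, stated in full; the proofs are below) =====
def Claim_equal_maxmin_first : Prop := ∀ (u1 : List (List Int)), Dom_maxmin_first u1 → Pre_maxmin_first u1 → Spec_maxmin_first u1 (maxmin_first u1)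

-- ===== LEMMAS AND PROOFS =====

-- row minimum as both ports compute it
def pvRowMin (r : List Int) : Int := (PySem.List.min? r (fun x => x)).getD 0

-- the indices (offset by i) of the entries of ms that equal M
def pvIdxOf : List Int → Int → Int → List Int
  | [], _, _ => []
  | m :: rest, M, i => (if m = M then [i] else []) ++ pvIdxOf rest M (i + 1)

lemma pvIdxOf_eq_range (ms : List Int) (M : Int) :
    ∀ i : Int,
      ((List.range ms.length).filter (fun j => decide (ms.getD j 0 = M))).map (fun j : Nat => i + (j : Int))
        = pvIdxOf ms M i := by
  induction ms with
  | nil => intro i; simp [pvIdxOf]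
  | cons m rest ih =>
    intro i
    rw [List.length_cons, List.range_succ_eq_map, List.filter_cons]
    have h1 : List.filter (fun j => decide ((m :: rest).getD j 0 = M)) (List.map Nat.succ (List.range rest.length))
        = List.map Nat.succ (List.filter (fun j => decide (rest.getD j 0 = M)) (List.range rest.length)) := by
      rw [List.filter_map]; rfl
    have h2 : List.map (fun j : Nat => i + (j : Int)) (List.map Nat.succ (List.filter (fun j => decide (rest.getD j 0 = M)) (List.range rest.length)))
        = List.map (fun j : Nat => (i + 1) + (j : Int)) (List.filter (fun j => decide (rest.getD j 0 = M)) (List.range rest.length)) := by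
      rw [List.map_map]
      exact List.map_congr_left (fun j _ => by simp [Function.comp]; ring)
    by_cases h : m = M
    · rw [if_pos (by simpa using h)]
      simp only [pvIdxOf, if_pos h, h1, List.map_cons, h2, ih]
      simp
    · rw [if_neg (by simpa using h)]
      simp only [pvIdxOf, if_neg h, h1, h2, ih]
      simp

-- the B loop computes the accumulator (kept iff b is still the max) plus the matching indices
lemma maxminAltLoop_some (rows : List (List Int)) :
    ∀ (i b : Int) (idxs : List Int),
      maxminAltLoop rows i (some b) idxs
        = (if (rows.map pvRowMin).foldl max b = b then idxs else [])
            ++ pvIdxOf (rows.map pvRowMin) ((rows.map pvRowMin).foldl max b) i := by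
  induction rows with
  | nil => intro i b idxs; simp [maxminAltLoop, pvIdxOf]
  | cons r rest ih =>
    intro i b idxs
    have hmax : ∀ x : Int, x ≤ (rest.map pvRowMin).foldl max x := fun x =>
      (PySem.List.le_foldl_max (rest.map pvRowMin) x).1
    simp only [maxminAltLoop, List.map_cons, List.foldl_cons]
    rw [show ((PySem.List.min? r (fun x => x)).getD 0) = pvRowMin r from rfl]
    simp only [pvIdxOf]
    by_cases h1 : pvRowMin r > b
    · rw [if_pos h1, ih]
      have hb : max b (pvRowMin r) = pvRowMin r := by omega
      simp only [hb]
      have hne : ¬ (rest.map pvRowMin).foldl max (pvRowMin r) = b := by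
        have := hmax (pvRowMin r); omega
      rw [if_neg hne]
      by_cases h2 : pvRowMin r = (rest.map pvRowMin).foldl max (pvRowMin r)
      · simp [h2.symm]
      · have h2' : ¬ (rest.map pvRowMin).foldl max (pvRowMin r) = pvRowMin r := fun e => h2 e.symm
        simp [h2, h2']
    · rw [if_neg h1]
      have hb : max b (pvRowMin r) = b := by omega
      by_cases h2 : pvRowMin r = b
      · rw [if_pos h2, ih]
        simp only [hb]
        by_cases h3 : (rest.map pvRowMin).foldl max b = b
        · simp [h3, h2.trans h3.symm]
        · have h4 : ¬ pvRowMin r = (rest.map pvRowMin).foldl max b := by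
            have := hmax b; omega
          simp [h3, h4]
      · rw [if_neg h2, ih]
        simp only [hb]
        have h4 : ¬ pvRowMin r = (rest.map pvRowMin).foldl max b := by
          have := hmax b; omega
        simp [h4]

-- A's first loop builds the min-list as a map
lemma maxmin_minlist (u1 : List (List Int)) :
    (PySem.List.pyRange 0 (PySem.List.len u1) 1).foldl
      (fun acc row => acc ++ [(PySem.List.min? (PySem.List.pyGetD u1 row []) (fun x => x)).getD 0]) []
      = u1.map pvRowMin := by
  have h := PySem.List.foldl_pyRange_zero_pyGetD u1 [] (fun acc r => acc ++ [pvRowMin r]) []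
  rw [show (fun (acc : List Int) (row : Int) => acc ++ [(PySem.List.min? (PySem.List.pyGetD u1 row []) (fun x => x)).getD 0])
        = (fun (acc : List Int) (j : Int) => acc ++ [pvRowMin (PySem.List.pyGetD u1 j [])]) from rfl, h]
  simpa using PySem.List.foldl_append_singleton_eq_map pvRowMin u1 []

-- A's second loop selects exactly pvIdxOf
lemma maxmin_scan (ms : List Int) (M : Int) :
    (PySem.List.pyRange 0 (PySem.List.len ms) 1).foldl
      (fun acc i => if PySem.List.pyGetD ms i 0 = M then acc ++ [i] else acc) []
      = pvIdxOf ms M 0 := by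
  rw [PySem.List.foldl_append_ite_eq_filter (fun i : Int => PySem.List.pyGetD ms i 0 = M)]
  rw [PySem.List.pyRange_one, List.filter_map, List.nil_append]
  rw [← pvIdxOf_eq_range ms M 0]
  have hl : ((PySem.List.len ms : Int) - 0).toNat = ms.length := by simp [PySem.List.len]
  rw [hl]
  exact congrArg _ (List.filter_congr fun j _ => by
    simp [Function.comp, PySem.List.pyGetD_natCast])

-- ===== VERDICT (by name: the statement is the Claim_ definition above) =====
theorem maxmin_first_spec : Claim_equal_maxmin_first := by
  intro u1 _ hpre
  obtain ⟨hne, _⟩ := hpre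
  unfold Spec_maxmin_first maxmin_first maxmin_first_alt
  rw [maxmin_minlist]
  obtain ⟨r, rest, rfl⟩ : ∃ r rest, u1 = r :: rest := by
    cases u1 with
    | nil => exact absurd rfl hne
    | cons r rest => exact ⟨r, rest, rfl⟩
  simp only [List.map_cons, PySem.List.max?_id_cons, Option.getD_some]
  rw [maxmin_scan]
  simp only [maxminAltLoop, maxminAltLoop_some, pvIdxOf]
  rw [show ((PySem.List.min? r (fun x => x)).getD 0) = pvRowMin r from rfl]
  have hmax : pvRowMin r ≤ (rest.map pvRowMin).foldl max (pvRowMin r) :=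
    (PySem.List.le_foldl_max _ _).1
  by_cases h : (rest.map pvRowMin).foldl max (pvRowMin r) = pvRowMin r
  · simp [h, show ((0:Int) + 1) = 1 by ring]
  · have h' : ¬ pvRowMin r = (rest.map pvRowMin).foldl max (pvRowMin r) := fun e => h e.symm
    simp [h, h', show ((0:Int) + 1) = 1 by ring]
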